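-- pv_equiv track=rewrite | github.com/ikokkari/AI | Python/solutions.py | unity_partition
-- ===== SOURCE A (Python) =====
-- def unity_partition(n):
--     from fractions import Fraction
--
--     def backtrack(target_sum, target_frac, current_list, start):
--         # Base case: we've used up both the sum and the fraction
--         if target_sum == 0 and target_frac == 0:
--             return current_list[:]
--
--         # Dead ends
--         if target_sum <= 0 or target_frac <= 0:
--             return None
--
--         # Try each possible next number
--         for num in range(start, target_sum + 1):
--             reciprocal = Fraction(1, num)
--
--             # Skip if reciprocal is too large
--             if reciprocal > target_frac:
--                 continue
--
--             # Try adding this number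
--             current_list.append(num)
--             result = backtrack(target_sum - num, target_frac - reciprocal, current_list, num + 1)
--
--             if result is not None:
--                 return result
--
--             current_list.pop()
--
--         return None
--
--     result = backtrack(n, Fraction(1, 1), [], 2)
--     return result if result else []
-- ===== SOURCE B (Python) =====
-- def unity_partition(n):
--     from fractions import Fraction
--     # Iterative DFS with an explicit stack of frames (ts, tf, path, num):
--     # each frame carries its own path and next candidate; child pushed above
--     # the sibling-continuation so candidates are tried in increasing order.
--     stack = [(n, Fraction(1, 1), [], 2)]
--     while stack:
--         ts, tf, path, num = stack.pop()
--         if ts == 0 and tf == 0: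
--             return path
--         if ts <= 0 or tf <= 0:
--             continue
--         if num > ts:
--             continue
--         rec = Fraction(1, num)
--         stack.append((ts, tf, path, num + 1))
--         if rec <= tf:
--             stack.append((ts - num, tf - rec, path + [num], num + 1))
--     return []
-- ===== Notes on version B (the rewrite author's own statement) =====
-- stated objective: alternative
-- what changed: The recursive backtracking (call stack, shared mutated current_list) is replaced by an iterative DFS loop over an explicit stack of frames, each frame carrying its own path and next candidate, with the child frame pushed above the sibling-continuation so the first solution found is identical.
import Mathlib
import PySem

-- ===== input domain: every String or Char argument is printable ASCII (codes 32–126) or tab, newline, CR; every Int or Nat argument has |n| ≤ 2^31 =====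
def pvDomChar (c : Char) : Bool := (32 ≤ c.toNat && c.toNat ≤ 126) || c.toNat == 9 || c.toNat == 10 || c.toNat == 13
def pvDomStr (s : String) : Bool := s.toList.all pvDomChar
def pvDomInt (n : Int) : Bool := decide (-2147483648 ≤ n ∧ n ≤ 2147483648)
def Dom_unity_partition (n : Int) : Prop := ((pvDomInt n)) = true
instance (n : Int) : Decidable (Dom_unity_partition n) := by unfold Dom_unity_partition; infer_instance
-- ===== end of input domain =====

-- B replaces the recursive backtracking by an iterative DFS over an explicit stack of
-- frames (each frame carrying its own path and next candidate); objective: alternative.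

-- ===== PORT A =====
-- A's recursive backtrack, split into the call body (btA) and its for-loop (loopA).
-- Fraction(1, num) is ported as (1 : ℚ) / num; every candidate num on a reachable call
-- satisfies num ≥ 2 (start begins at 2 and only grows), so the `num < 2` guard below is
-- never taken on calls reachable from unity_partition.  The Nat fuel is a pure totality
-- guard (it only decreases, never alters a branch); unity_partition passes (n.toNat+2)^2,
-- which exceeds the recursion depth (proved sufficient in the lemmas below).
mutual
def btA : Nat → Int → ℚ → List Int → Int → Option (List Int)
  | 0, _, _, _, _ => none  -- fuel exhausted (never reached from unity_partition)
  | fuel + 1, ts, tf, cur, start =>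
    if ts = 0 ∧ tf = 0 then some cur
    else if ts ≤ 0 ∨ tf ≤ 0 then none
    else loopA fuel ts tf cur start

def loopA : Nat → Int → ℚ → List Int → Int → Option (List Int)
  | 0, _, _, _, _ => none  -- fuel exhausted (never reached from unity_partition)
  | fuel + 1, ts, tf, cur, num =>
    if num ≤ ts then
      if num < 2 then none  -- unreachable guard (num ≥ 2 always)
      else if (1 : ℚ) / (num : ℚ) > tf then loopA fuel ts tf cur (num + 1)
      else
        match btA fuel (ts - num) (tf - 1 / (num : ℚ)) (cur ++ [num]) (num + 1) with
        | some r => some r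
        | none => loopA fuel ts tf cur (num + 1)
    else none
end

def unity_partition (n : Int) : List Int :=
  (btA ((n.toNat + 2) * (n.toNat + 2)) n 1 [] 2).getD []

-- ===== PORT B =====
-- the while-loop of Source B: pop a frame, return / discard / push.  The Nat fuel is a pure
-- totality guard; unity_partition_alt passes 3^(2n+1)+1, which exceeds the step count.
def runB : Nat → List (Int × ℚ × List Int × Int) → Option (List Int)
  | 0, _ => none  -- fuel exhausted (never reached from unity_partition_alt)
  | _ + 1, [] => none
  | fuel + 1, (ts, tf, path, num) :: rest =>
    if ts = 0 ∧ tf = 0 then some path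
    else if ts ≤ 0 ∨ tf ≤ 0 then runB fuel rest
    else if num ≤ ts then
      if num < 2 then runB fuel rest  -- unreachable guard (num ≥ 2 always)
      else if (1 : ℚ) / (num : ℚ) > tf then runB fuel ((ts, tf, path, num + 1) :: rest)
      else runB fuel ((ts - num, tf - 1 / (num : ℚ), path ++ [num], num + 1) ::
                      (ts, tf, path, num + 1) :: rest)
    else runB fuel rest

def unity_partition_alt (n : Int) : List Int :=
  (runB (3 ^ (2 * n + 1).toNat + 1) [(n, (1 : ℚ), ([] : List Int), (2 : Int))]).getD []

-- ===== PRECONDITION & SPEC =====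
def Spec_unity_partition (n : Int) (out : List Int) : Prop := out = unity_partition_alt n
instance (n : Int) (out : List Int) : Decidable (Spec_unity_partition n out) := by unfold Spec_unity_partition; infer_instance

-- ===== CLAIM (what is proved, stated in full; the proofs are below) =====
def Claim_equal_unity_partition : Prop := ∀ (n : Int), Dom_unity_partition n → Spec_unity_partition n (unity_partition n)

-- ===== LEMMAS AND PROOFS =====

-- fuel-free ("ideal") versions of A's two functions, by well-founded recursion;
-- both ports are reduced to these for fuels above the explicit bounds below
mutual
def btW (ts : Int) (tf : ℚ) (cur : List Int) (start : Int) : Option (List Int) :=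
  if ts = 0 ∧ tf = 0 then some cur
  else if ts ≤ 0 ∨ tf ≤ 0 then none
  else loopW ts tf cur start
termination_by ((ts.toNat : Nat), (ts + 1 - start).toNat + 1)
decreasing_by
  exact Prod.Lex.right _ (by omega)

def loopW (ts : Int) (tf : ℚ) (cur : List Int) (num : Int) : Option (List Int) :=
  if _hle : num ≤ ts then
    if _hg : num < 2 then none
    else if (1 : ℚ) / (num : ℚ) > tf then loopW ts tf cur (num + 1)
    else
      match btW (ts - num) (tf - 1 / (num : ℚ)) (cur ++ [num]) (num + 1) with
      | some r => some r
      | none => loopW ts tf cur (num + 1)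
  else none
termination_by ((ts.toNat : Nat), (ts + 1 - num).toNat)
decreasing_by
  all_goals first
    | exact Prod.Lex.left _ _ (by omega)
    | exact Prod.Lex.right _ (by omega)
end

theorem btW_pos (ts : Int) (tf : ℚ) (cur : List Int) (s : Int)
    (h1 : ¬(ts = 0 ∧ tf = 0)) (h2 : ¬(ts ≤ 0 ∨ tf ≤ 0)) :
    btW ts tf cur s = loopW ts tf cur s := by
  rw [btW]; simp [h1, h2]

theorem loopW_step (ts : Int) (tf : ℚ) (cur : List Int) (num : Int)
    (hle : num ≤ ts) (hg : ¬num < 2) :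
    loopW ts tf cur num =
      if (1 : ℚ) / (num : ℚ) > tf then loopW ts tf cur (num + 1)
      else
        match btW (ts - num) (tf - 1 / (num : ℚ)) (cur ++ [num]) (num + 1) with
        | some r => some r
        | none => loopW ts tf cur (num + 1) := by
  rw [loopW, dif_pos hle, dif_neg hg]

-- with fuel above the explicit quadratic depth bound, the fueled A-port computes btW/loopW
theorem suffA (fuel : Nat) :
    (∀ (ts : Int) (tf : ℚ) (cur : List Int) (num : Int),
        ((ts + 2) * (ts + 2) - num).toNat < fuel → loopA fuel ts tf cur num = loopW ts tf cur num) ∧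
    (∀ (ts : Int) (tf : ℚ) (cur : List Int) (start : Int),
        ((ts + 2) * (ts + 2) - start).toNat + 1 < fuel → btA fuel ts tf cur start = btW ts tf cur start) := by
  induction fuel with
  | zero => exact ⟨fun _ _ _ _ h => absurd h (by omega), fun _ _ _ _ h => absurd h (by omega)⟩
  | succ f ih =>
    constructor
    · intro ts tf cur num hb
      rw [loopA, loopW]
      by_cases hle : num ≤ ts
      · rw [dif_pos hle, if_pos hle]
        by_cases hg : num < 2
        · rw [dif_pos hg, if_pos hg]
        · rw [dif_neg hg, if_neg hg]
          have hmono : (f + 1) - 1 = f := rfl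
          have hnum2 : (2 : Int) ≤ num := by omega
          have hsq : num + 1 < (ts + 2) * (ts + 2) := by nlinarith
          have hnext : ((ts + 2) * (ts + 2) - (num + 1)).toNat < f := by omega
          have hchild : ((ts - num + 2) * (ts - num + 2) - (num + 1)).toNat + 1 < f := by
            have h1 : (ts - num + 2) * (ts - num + 2) + num + 3 ≤ (ts + 2) * (ts + 2) := by nlinarith
            omega
          rw [ih.1 ts tf cur (num + 1) hnext, ih.2 (ts - num) (tf - 1 / (num : ℚ)) (cur ++ [num]) (num + 1) hchild]
      · rw [dif_neg hle, if_neg hle]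
    · intro ts tf cur start hb
      rw [btA, btW]
      by_cases h1 : ts = 0 ∧ tf = 0
      · rw [if_pos h1, if_pos h1]
      · rw [if_neg h1, if_neg h1]
        by_cases h2 : ts ≤ 0 ∨ tf ≤ 0
        · rw [if_pos h2, if_pos h2]
        · rw [if_neg h2, if_neg h2]
          exact ih.1 ts tf cur start (by omega)

-- weight of a frame; its stack sum bounds the number of remaining machine steps
def wB (f : Int × ℚ × List Int × Int) : Nat := 3 ^ (2 * f.1 - f.2.2.2 + 1).toNat

-- first Some produced by running A's (ideal) backtrack on each frame of the stack in order
def firstW : List (Int × ℚ × List Int × Int) → Option (List Int)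
  | [] => none
  | (ts, tf, path, num) :: rest =>
    match btW ts tf path num with
    | some r => some r
    | none => firstW rest

-- with fuel above the stack's weight sum, the fueled machine computes firstW
theorem suffB (fuel : Nat) :
    ∀ (s : List (Int × ℚ × List Int × Int)), (s.map wB).sum < fuel → runB fuel s = firstW s := by
  induction fuel with
  | zero => exact fun _ h => absurd h (by omega)
  | succ f ih =>
    intro s hs
    match s with
    | [] => rw [runB, firstW]
    | (ts, tf, path, num) :: rest =>
      simp only [List.map_cons, List.sum_cons] at hs
      have hpos : 0 < wB (ts, tf, path, num) := by simp only [wB]; positivity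
      rw [runB, firstW]
      by_cases hb : ts = 0 ∧ tf = 0
      · rw [if_pos hb, btW, if_pos hb]
      · rw [if_neg hb]
        by_cases hd : ts ≤ 0 ∨ tf ≤ 0
        · rw [if_pos hd, ih rest (by omega), btW, if_neg hb, if_pos hd]
        · rw [if_neg hd]
          by_cases hle : num ≤ ts
          · rw [if_pos hle]
            by_cases hg : num < 2
            · rw [if_pos hg, ih rest (by omega), btW_pos ts tf path num hb hd, loopW,
                 dif_pos hle, dif_pos hg]
            · rw [if_neg hg]
              by_cases hskip : (1 : ℚ) / (num : ℚ) > tf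
              · rw [if_pos hskip]
                have hlt : wB (ts, tf, path, num + 1) < wB (ts, tf, path, num) := by
                  simp only [wB]
                  exact Nat.pow_lt_pow_right (by norm_num) (by omega)
                rw [ih ((ts, tf, path, num + 1) :: rest)
                     (by simp only [List.map_cons, List.sum_cons]; omega), firstW]
                have hsame : btW ts tf path num = btW ts tf path (num + 1) := by
                  rw [btW_pos ts tf path num hb hd, btW_pos ts tf path (num + 1) hb hd,
                     loopW_step ts tf path num hle hg, if_pos hskip]
                rw [hsame]
              · rw [if_neg hskip]
                have hcs : wB (ts - num, tf - 1 / (num : ℚ), path ++ [num], num + 1) +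
                    wB (ts, tf, path, num + 1) < wB (ts, tf, path, num) := by
                  simp only [wB]
                  have ha : (2 * (ts - num) - (num + 1) + 1).toNat ≤ (2 * ts - (num + 1) + 1).toNat := by
                    omega
                  have hpl := Nat.pow_le_pow_right (n := 3) (by norm_num) ha
                  have hc : (2 * ts - num + 1).toNat = (2 * ts - (num + 1) + 1).toNat + 1 := by
                    omega
                  have hp : 0 < 3 ^ (2 * ts - (num + 1) + 1).toNat := by positivity
                  rw [hc, pow_succ]
                  omega
                rw [ih ((ts - num, tf - 1 / (num : ℚ), path ++ [num], num + 1) ::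
                        (ts, tf, path, num + 1) :: rest)
                     (by simp only [List.map_cons, List.sum_cons]; omega), firstW, firstW]
                have hstep : btW ts tf path num =
                    match btW (ts - num) (tf - 1 / (num : ℚ)) (path ++ [num]) (num + 1) with
                    | some r => some r
                    | none => btW ts tf path (num + 1) := by
                  rw [btW_pos ts tf path num hb hd, loopW_step ts tf path num hle hg,
                     if_neg hskip, ← btW_pos ts tf path (num + 1) hb hd]
                rw [hstep]
                rcases btW (ts - num) (tf - 1 / (num : ℚ)) (path ++ [num]) (num + 1) with _ | r <;> rfl
          · rw [if_neg hle, ih rest (by omega), btW_pos ts tf path num hb hd, loopW, dif_neg hle]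

-- ===== VERDICT (by name: the statement is the Claim_ definition above) =====
theorem unity_partition_spec : Claim_equal_unity_partition := by
  intro n _
  unfold Spec_unity_partition unity_partition unity_partition_alt
  have hrun : runB (3 ^ (2 * n + 1).toNat + 1) [(n, (1 : ℚ), ([] : List Int), (2 : Int))] =
      firstW [(n, (1 : ℚ), ([] : List Int), (2 : Int))] := by
    apply suffB
    simp only [List.map_cons, List.map_nil, List.sum_cons, List.sum_nil, wB]
    have := Nat.pow_le_pow_right (n := 3) (by norm_num)
      (show (2 * n - 2 + 1).toNat ≤ (2 * n + 1).toNat by omega)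
    omega
  have hbt : btA ((n.toNat + 2) * (n.toNat + 2)) n 1 [] 2 = btW n 1 [] 2 := by
    rcases (by omega : n ≤ 0 ∨ 0 < n) with hn | hn
    · obtain ⟨k, hk⟩ : ∃ k, (n.toNat + 2) * (n.toNat + 2) = k + 1 :=
        ⟨(n.toNat + 2) * (n.toNat + 2) - 1, by
          have : 0 < (n.toNat + 2) * (n.toNat + 2) := by positivity
          omega⟩
      have hnb : ¬(n = 0 ∧ (1 : ℚ) = 0) := by simp
      rw [hk, btA, btW, if_neg hnb, if_neg hnb,
         if_pos (Or.inl hn : n ≤ 0 ∨ (1 : ℚ) ≤ 0), if_pos (Or.inl hn : n ≤ 0 ∨ (1 : ℚ) ≤ 0)]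
    · apply (suffA _).2
      have hm : (n.toNat : Int) = n := Int.toNat_of_nonneg (by omega)
      have hsq : (n + 2) * (n + 2) = (((n.toNat + 2) * (n.toNat + 2) : Nat) : Int) := by
        push_cast [hm]; ring
      have h4 : 4 ≤ (n.toNat + 2) * (n.toNat + 2) := Nat.mul_le_mul (Nat.le_add_left 2 n.toNat) (Nat.le_add_left 2 n.toNat)
      omega
  rw [hbt, hrun, firstW]
  rcases h : btW n 1 [] 2 with _ | r <;> simp [firstW]
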